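-- pv_equiv track=rewrite | github.com/RomZerr0/hipku | hipku.py | pad_octets
-- ===== SOURCE A (Python) =====
-- def pad_octets(octet_array, num_missing_octets):
--     padded_octet = 0
--     a_length = len(octet_array)
--
--     # If the first or last octets are blank, zero them
--     if octet_array[0] == '':
--         octet_array[0] = str(padded_octet)
--     if octet_array[a_length - 1] == '':
--         octet_array[a_length - 1] = str(padded_octet)
--
--     # Check the rest of the array for blank octets and pad as needed
--     i = 0
--     while i < a_length:
--         if octet_array[i] == '':
--             octet_array[i] = str(padded_octet)
--             for j in range(num_missing_octets):
--                 octet_array.insert(i, str(padded_octet))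
--             a_length = len(octet_array)
--         i += 1
--
--     return octet_array
-- ===== SOURCE B (Python) =====
-- def pad_octets(octet_array, num_missing_octets):
--     last = len(octet_array) - 1
--     zeros = 1 + max(num_missing_octets, 0)
--     result = []
--     for i, octet in enumerate(octet_array):
--         if octet != '':
--             result.append(octet)
--         elif i == 0 or i == last:
--             result.append('0')
--         else:
--             result.extend(['0'] * zeros)
--     octet_array[:] = result
--     return octet_array
-- ===== Notes on version B (the rewrite author's own statement) =====
-- stated objective: simpler
-- what changed: Replaces A's in-place insert-and-rescan while loop (which mutates and re-measures the list as it walks it) with a single forward pass that emits each octet's expansion into a fresh result list: non-blank octets pass through, a blank at index 0 or the last index becomes one '0', and an interior blank becomes 1+max(num_missing_octets,0) copies of '0'.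
-- outside the precondition, e.g. on pad_octets([], 0): A raises IndexError, B returns []
import Mathlib
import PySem

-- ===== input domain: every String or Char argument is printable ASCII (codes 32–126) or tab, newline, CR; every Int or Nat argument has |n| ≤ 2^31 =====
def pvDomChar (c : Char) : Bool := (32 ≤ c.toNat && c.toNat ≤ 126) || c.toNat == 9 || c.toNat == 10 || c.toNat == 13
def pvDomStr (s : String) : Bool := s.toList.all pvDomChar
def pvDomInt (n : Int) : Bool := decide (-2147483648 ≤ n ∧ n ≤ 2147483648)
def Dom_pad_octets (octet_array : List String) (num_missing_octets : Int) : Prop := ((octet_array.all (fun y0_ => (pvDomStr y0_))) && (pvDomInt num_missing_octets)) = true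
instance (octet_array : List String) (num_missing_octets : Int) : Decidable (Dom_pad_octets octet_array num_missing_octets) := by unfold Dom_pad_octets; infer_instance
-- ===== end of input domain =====

-- B replaces A's in-place insert-and-rescan while loop by one forward pass appending each
-- octet's expansion to a fresh result list (objective: simpler). Both Pythons mutate the
-- argument list in place; the equivalence proved here is about the returned value.

-- ===== PORT A =====
-- Termination helpers for A's while loop (the loop strictly reduces the number of blanks,
-- or keeps them and moves i forward); cited by name in decreasing_by.
theorem pv_foldl_insert {β : Type} (l : List β) (a : List String) (i : Nat) (h : i ≤ a.length) :
    l.foldl (fun acc _ => PySem.List.insert acc (i : Int) "0") a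
      = a.take i ++ List.replicate l.length "0" ++ a.drop i := by
  induction l generalizing a with
  | nil => simp
  | cons x t ih =>
    simp only [List.foldl_cons]
    rw [PySem.List.insert_natCast a i "0" h, ih _ (by simp; omega)]
    simp [List.length_take, Nat.min_eq_left h, List.replicate_succ]
    have : ∀ (n : Nat) (rest : List String), List.replicate n "0" ++ "0" :: rest = "0" :: (List.replicate n "0" ++ rest) := by
      intro n rest; induction n with
      | zero => simp
      | succ k ih2 => simp [List.replicate_succ, ih2]
    exact this _ _

theorem pv_count_lt (arr : List String) (i : Nat) (num : Int) (h : i < arr.length) (hb : arr.getD i "" = "") :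
    ((PySem.List.pyRange 0 num 1).foldl (fun a _ => PySem.List.insert a (i : Int) "0") (arr.set i "0")).count ""
      < arr.count "" := by
  rw [pv_foldl_insert _ _ _ (by simp; omega)]
  rw [List.set_eq_take_cons_drop _ h]
  conv_rhs => rw [← List.take_append_drop i arr, List.drop_eq_getElem_cons h]
  have hg : arr[i] = "" := by rwa [List.getD_eq_getElem _ _ h] at hb
  simp [List.take_append, List.drop_append, List.take_take, Nat.min_eq_left (Nat.le_of_lt h),
    List.count_append, List.count_cons, List.count_replicate, hg]

-- A's while loop: i walks the (growing) list; a blank at i is zeroed and num_missing_octets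
-- copies of '0' are inserted before it, after which a_length is refreshed.  The Python
-- variable a_length always equals len(octet_array) at the loop test, so the port reads
-- arr.length directly; arr.getD i "" is exact since the loop guard gives i < arr.length.
def padA_loop (arr : List String) (i : Nat) (num : Int) : List String :=
  if _h : i < arr.length then
    if hb : arr.getD i "" = "" then
      let arr2 := (PySem.List.pyRange 0 num 1).foldl
        (fun a _ => PySem.List.insert a (i : Int) "0") (arr.set i "0")
      padA_loop arr2 (i + 1) num
    else padA_loop arr (i + 1) num
  else arr
  termination_by ((arr.count "", arr.length - i) : Nat ×ₗ Nat)
  decreasing_by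
  · exact Prod.Lex.left _ _ (pv_count_lt arr i num _h hb)
  · exact Prod.Lex.right _ (by omega)

def pad_octets (octet_array : List String) (num_missing_octets : Int) : List String :=
  let a_length := octet_array.length
  -- octet_array[0] raises IndexError on the empty list: Pre_ excludes it (getD is exact inside Pre_)
  let arr1 := if octet_array.getD 0 "" = "" then octet_array.set 0 "0" else octet_array
  let arr2 := if arr1.getD (a_length - 1) "" = "" then arr1.set (a_length - 1) "0" else arr1
  padA_loop arr2 0 num_missing_octets

-- ===== PORT B =====
def pad_octets_alt (octet_array : List String) (num_missing_octets : Int) : List String :=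
  let last : Int := (octet_array.length : Int) - 1
  let zeros : Nat := (1 + max num_missing_octets 0).toNat
  (PySem.List.enumerate octet_array).foldl
    (fun result p =>
      if p.2 ≠ "" then result ++ [p.2]
      else if p.1 = 0 ∨ p.1 = last then result ++ ["0"]
      else result ++ List.replicate zeros "0") []

-- ===== PRECONDITION & SPEC =====
-- Pre_ excludes only the empty list, on which Python A raises IndexError at octet_array[0].
def Pre_pad_octets (octet_array : List String) (num_missing_octets : Int) : Prop :=
  octet_array ≠ []
instance (octet_array : List String) (num_missing_octets : Int) : Decidable (Pre_pad_octets octet_array num_missing_octets) := by unfold Pre_pad_octets; infer_instance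
def pvWitness_pad_octets : List String × Int := (["10", "", "32"], 1)

def Spec_pad_octets (octet_array : List String) (num_missing_octets : Int) (out : List String) : Prop := out = pad_octets_alt octet_array num_missing_octets
instance (octet_array : List String) (num_missing_octets : Int) (out : List String) : Decidable (Spec_pad_octets octet_array num_missing_octets out) := by unfold Spec_pad_octets; infer_instance

-- ===== CLAIM (what is proved, stated in full; the proofs are below) =====
def Claim_equal_pad_octets : Prop := ∀ (octet_array : List String) (num_missing_octets : Int), Dom_pad_octets octet_array num_missing_octets → Pre_pad_octets octet_array num_missing_octets → Spec_pad_octets octet_array num_missing_octets (pad_octets octet_array num_missing_octets)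

-- ===== LEMMAS AND PROOFS =====

-- the per-octet expansion A's loop performs on the list with fixed ends
def padf (num : Int) (s : String) : List String :=
  if s = "" then List.replicate (num.toNat + 1) "0" else [s]

-- the per-(index, octet) expansion B performs
def padg (last : Int) (zeros : Nat) (p : Int × String) : List String :=
  if p.2 ≠ "" then [p.2] else if p.1 = 0 ∨ p.1 = last then ["0"] else List.replicate zeros "0"

theorem pv_flatMap_replicate (num : Int) (n : Nat) :
    (List.replicate n "0").flatMap (padf num) = List.replicate n "0" := by
  induction n with
  | zero => simp
  | succ k ih => simp [List.replicate_succ, ih, padf]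

theorem pv_replicate_comm (n : Nat) (rest : List String) :
    List.replicate n "0" ++ "0" :: rest = "0" :: (List.replicate n "0" ++ rest) := by
  induction n with
  | zero => simp
  | succ k ih => simp [List.replicate_succ, ih]

theorem padA_loop_eq (num : Int) (arr : List String) (i : Nat) :
    padA_loop arr i num = arr.take i ++ (arr.drop i).flatMap (padf num) := by
  induction arr, i using padA_loop.induct num with
  | case1 arr i h hb arr2 ih =>
    rw [padA_loop]
    simp only [dif_pos h, dif_pos hb]
    rw [ih]
    have hg : arr[i] = "" := by rwa [List.getD_eq_getElem _ _ h] at hb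
    have hlen : (List.take i arr).length = i := by simp [Nat.le_of_lt h]
    have harr2 : arr2 = List.take i arr ++ "0" :: (List.replicate num.toNat "0" ++ List.drop (i + 1) arr) := by
      show List.foldl _ _ _ = _
      rw [pv_foldl_insert _ _ _ (by rw [List.length_set]; omega)]
      rw [List.set_eq_take_cons_drop _ h]
      simp only [List.take_append, List.drop_append, List.take_take, hlen,
        Nat.min_self, Nat.sub_self, List.take_zero, List.drop_zero, List.append_nil, List.nil_append]
      rw [PySem.List.length_pyRange_one, List.drop_of_length_le (Nat.le_of_eq hlen),
        List.nil_append, List.append_assoc, pv_replicate_comm]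
      norm_num
    rw [harr2]
    conv_rhs => rw [List.drop_eq_getElem_cons h]
    rw [List.take_append, List.drop_append, hlen]
    simp only [Nat.sub_self, List.take_take, Nat.min_self, Nat.add_sub_cancel_left]
    simp [Nat.min_eq_right (Nat.le_succ i), List.drop_of_length_le (Nat.le_of_eq hlen),
      List.flatMap_append, pv_flatMap_replicate, padf, hg, List.replicate_succ]
    intro x hx
    rw [List.drop_of_length_le (by rw [hlen]; omega)] at hx
    simp at hx
  | case2 arr i h hb ih =>
    rw [padA_loop]
    simp only [dif_pos h, dif_neg hb]
    rw [ih]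
    have hg : arr[i] ≠ "" := by rwa [List.getD_eq_getElem _ _ h] at hb
    have hp : padf num arr[i] = [arr[i]] := by simp [padf, hg]
    have ht : List.take (i + 1) arr = List.take i arr ++ [arr[i]] := by
      rw [List.take_add_one, List.getElem?_eq_getElem h]; rfl
    conv_rhs => rw [List.drop_eq_getElem_cons h]
    rw [List.flatMap_cons, hp, ht, List.append_assoc]
  | case3 arr i h =>
    rw [padA_loop]
    simp only [dif_neg h]
    rw [List.take_of_length_le (by omega), List.drop_of_length_le (by omega)]
    simp

theorem pad_octets_alt_eq (arr : List String) (num : Int) :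
    pad_octets_alt arr num
      = (PySem.List.enumerate arr).flatMap (padg ((arr.length : Int) - 1) ((1 + max num 0).toNat)) := by
  show (PySem.List.enumerate arr).foldl
      (fun result p =>
        if p.2 ≠ "" then result ++ [p.2]
        else if p.1 = 0 ∨ p.1 = ((arr.length : Int) - 1) then result ++ ["0"]
        else result ++ List.replicate ((1 + max num 0).toNat) "0") [] = _
  have hfun : (fun (result : List String) (p : Int × String) =>
      if p.2 ≠ "" then result ++ [p.2]
      else if p.1 = 0 ∨ p.1 = ((arr.length : Int) - 1) then result ++ ["0"]
      else result ++ List.replicate ((1 + max num 0).toNat) "0")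
      = fun result p => result ++ padg ((arr.length : Int) - 1) ((1 + max num 0).toNat) p := by
    funext r p; simp only [padg]; split_ifs <;> rfl
  rw [hfun, PySem.List.foldl_append_eq_flatMap]
  simp

theorem pv_fixends_eq (arr : List String) (h : arr ≠ []) :
    (if (if arr.getD 0 "" = "" then arr.set 0 "0" else arr).getD (arr.length - 1) "" = ""
      then (if arr.getD 0 "" = "" then arr.set 0 "0" else arr).set (arr.length - 1) "0"
      else (if arr.getD 0 "" = "" then arr.set 0 "0" else arr))
      = (PySem.List.enumerate arr).map
          (fun p => if p.2 = "" ∧ (p.1 = 0 ∨ p.1 = (arr.length : Int) - 1) then "0" else p.2) := by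
  have hn : 0 < arr.length := List.length_pos_iff.mpr h
  apply List.ext_getElem?
  intro k
  rw [List.getElem?_map, PySem.List.getElem?_enumerate]
  by_cases hk : k < arr.length
  · rw [List.getElem?_eq_getElem hk]
    split_ifs with h1 h2 h3 <;>
      simp_all [List.getElem?_set, List.getElem?_eq_getElem, List.getD_eq_getElem, List.getElem_set] <;>
      (try split_ifs) <;> (try simp_all) <;> (try omega)
    · rename_i heq1 heq2 himp
      by_cases hzk : 0 = k
      · simp [hzk] at h2
      · rw [if_neg hzk] at h2
        exact absurd (by push_cast; omega) (himp h2).2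
    · rename_i hnk hand
      obtain ⟨hke, hor⟩ := hand
      have hk1 : k = arr.length - 1 := by omega
      subst hk1
      rw [if_neg (by omega)] at h2
      exact h2 hke
    · rename_i hne hand
      obtain ⟨hke, hor⟩ := hand
      rcases hor with h4 | h4
      · subst h4; exact h1 hke
      · exact hne (by omega)
    · intro hke
      refine ⟨fun hc => ?_, fun hc => ?_⟩
      · subst hc; exact h1 hke
      · have hk1 : k = arr.length - 1 := by omega
        subst hk1
        exact h3 hke
  · have : arr[k]? = none := List.getElem?_eq_none (by omega)
    rw [this]
    split_ifs <;> simp [List.getElem?_eq_none, List.length_set] <;> omega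

-- ===== VERDICT (by name: the statement is the Claim_ definition above) =====
theorem pad_octets_spec : Claim_equal_pad_octets := by
  intro arr num _dom hpre
  unfold Spec_pad_octets
  show padA_loop _ 0 num = _
  rw [pv_fixends_eq arr hpre, padA_loop_eq, pad_octets_alt_eq]
  simp only [List.take_zero, List.drop_zero, List.nil_append, List.flatMap_map]
  have hz : (1 + max num 0).toNat = num.toNat + 1 := by omega
  have hfun : (fun p : Int × String =>
      padf num (if p.2 = "" ∧ (p.1 = 0 ∨ p.1 = (arr.length : Int) - 1) then "0" else p.2))
      = padg ((arr.length : Int) - 1) ((1 + max num 0).toNat) := by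
    funext p
    by_cases hb : p.2 = ""
    · by_cases hc : p.1 = 0 ∨ p.1 = (arr.length : Int) - 1
      · simp [padf, padg, hb, hc]
      · simp [padf, padg, hb, hc, hz]
    · simp [padf, padg, hb]
  rw [hfun]
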